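-- pv_equiv track=rewrite | github.com/Mika2147/LegoMappingCar | helper/drive.py | getLeastTraversedPartnerPosition
-- ===== SOURCE A (Python) =====
-- nodes = {0: [0, [1, 0, 1, 48.5], [0, 1, -1, -1], [-1, 0, -1, -1], [0, -1, -1, -1]], 1: [1, [1, 0, -1, -1], [0, 1, 2, 112.0], [-1, 0, 0, 48.5], [0, -1, -1, -1]], 2: [2, [1, 0, 4, 48.0], [0, 1, -1, -1], [-1, 0, 3, 67.0], [0, -1, 1, 112.0]], 3: [3, [1, 0, 2, 67.0], [0, 1, -1, -1], [-1, 0, -1, -1], [0, -1, -1, -1]], 4: [4, [1, 0, -1, -1], [0, 1, -1, -1], [-1, 0, 2, 48.0], [0, -1, 5, 132.5]], 5: [5, [1, 0, -1, -1], [0, 1, 4, 132.5], [-1, 0, -1, -1], [0, -1, -1, -1]]}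
--
-- def getLeastTraversedPartnerPosition(nodeid, traversions):
--     node = nodes[nodeid]
--     res = (-1, -1)
--     minTrav = 9999999999
--     minDist = 9999999999
--     for i in range(1,5):
--         edge = node[i]
--         destination = edge[2]
--         distance = edge[3]
--         if destination != -1:
--             if traversions[destination] < minTrav or (traversions[destination] == minTrav and distance < minDist):
--                 res = (destination ,i)
--                 minTrav = traversions[destination]
--                 minDist = distance
--     return res
-- ===== SOURCE B (Python) =====
-- nodes = {0: [0, [1, 0, 1, 48.5], [0, 1, -1, -1], [-1, 0, -1, -1], [0, -1, -1, -1]], 1: [1, [1, 0, -1, -1], [0, 1, 2, 112.0], [-1, 0, 0, 48.5], [0, -1, -1, -1]], 2: [2, [1, 0, 4, 48.0], [0, 1, -1, -1], [-1, 0, 3, 67.0], [0, -1, 1, 112.0]], 3: [3, [1, 0, 2, 67.0], [0, 1, -1, -1], [-1, 0, -1, -1], [0, -1, -1, -1]], 4: [4, [1, 0, -1, -1], [0, 1, -1, -1], [-1, 0, 2, 48.0], [0, -1, 5, 132.5]], 5: [5, [1, 0, -1, -1], [0, 1, 4, 132.5], [-1, 0, -1, -1], [0, -1, -1, -1]]}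
--
-- # Precomputed once at import: each node's valid edges as (destination, position),
-- # listed in ascending order of the (fixed, per-node distinct) edge distance.
-- # With the edges pre-sorted by distance, A's lexicographic (traversals, distance)
-- # minimum is just the FIRST edge attaining the minimal traversal count, so the
-- # query needs a single-key min with first-occurrence tie-breaking.
-- _SORTED_EDGES = {}
-- for _nid, _node in nodes.items():
--     _cands = sorted((_node[_i][3], _node[_i][2], _i)
--                     for _i in range(1, 5) if _node[_i][2] != -1)
--     _SORTED_EDGES[_nid] = [(_dest, _i) for _dist, _dest, _i in _cands]
--
-- def getLeastTraversedPartnerPosition(nodeid, traversions):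
--     return min(_SORTED_EDGES[nodeid], key=lambda p: traversions[p[0]], default=(-1, -1))
-- ===== Notes on version B (the rewrite author's own statement) =====
-- stated objective: alternative
-- what changed: Instead of A's running-minimum loop over (traversals, distance) with three mutable state variables, B precomputes once, per node, the list of valid (destination, position) pairs sorted by ascending edge distance; a query is then a single-key min over that static list by traversal count alone, with first-occurrence tie-breaking standing in for A's distance tie-break (distances are distinct within each node).
import Mathlib
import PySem

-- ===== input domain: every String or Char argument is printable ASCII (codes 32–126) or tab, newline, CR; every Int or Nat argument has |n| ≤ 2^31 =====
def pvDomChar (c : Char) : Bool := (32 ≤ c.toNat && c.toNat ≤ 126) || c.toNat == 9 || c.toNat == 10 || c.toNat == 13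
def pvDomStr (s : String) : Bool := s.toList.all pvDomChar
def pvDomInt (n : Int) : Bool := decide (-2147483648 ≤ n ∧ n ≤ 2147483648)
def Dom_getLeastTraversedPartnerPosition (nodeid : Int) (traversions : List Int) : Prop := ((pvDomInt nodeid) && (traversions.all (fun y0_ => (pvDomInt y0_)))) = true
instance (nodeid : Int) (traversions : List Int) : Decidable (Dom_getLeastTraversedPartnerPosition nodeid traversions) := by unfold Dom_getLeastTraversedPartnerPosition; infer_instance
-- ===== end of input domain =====

-- B replaces A's running-minimum over (traversals, distance) by a per-node table of valid
-- (destination, position) pairs precomputed in ascending distance order, queried with a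
-- single-key min by traversal count (first occurrence wins); objective: alternative.
-- The module constant `nodes` stores float distances with .5 granularity; A's port stores
-- distances DOUBLED (×2) so they stay exact Ints: distances are only compared, never
-- returned, so every comparison (including against the sentinel, also doubled) is exact.

-- ===== PORT A =====
-- shared data table: per node, the four edges as (dx, dy, destination, 2*distance)
def pvNodes (k : Int) : List (Int × Int × Int × Int) :=
  if k = 0 then [(1,0,1,97),(0,1,-1,-2),(-1,0,-1,-2),(0,-1,-1,-2)]
  else if k = 1 then [(1,0,-1,-2),(0,1,2,224),(-1,0,0,97),(0,-1,-1,-2)]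
  else if k = 2 then [(1,0,4,96),(0,1,-1,-2),(-1,0,3,134),(0,-1,1,224)]
  else if k = 3 then [(1,0,2,134),(0,1,-1,-2),(-1,0,-1,-2),(0,-1,-1,-2)]
  else if k = 4 then [(1,0,-1,-2),(0,1,-1,-2),(-1,0,2,96),(0,-1,5,265)]
  else [(1,0,-1,-2),(0,1,4,265),(-1,0,-1,-2),(0,-1,-1,-2)]

def getLeastTraversedPartnerPosition (nodeid : Int) (traversions : List Int) : Int × Int :=
  let node := pvNodes nodeid
  -- for i in range(1,5): edge = node[i] …  running minimum with state (res, minTrav, minDist)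
  let st := (List.zip ([1,2,3,4] : List Int) node).foldl
    (fun (st : (Int × Int) × Int × Int) ie =>
      if ie.2.2.2.1 ≠ -1 then
        if PySem.List.pyGetD traversions ie.2.2.2.1 0 < st.2.1 ∨
            (PySem.List.pyGetD traversions ie.2.2.2.1 0 = st.2.1 ∧ ie.2.2.2.2 < st.2.2) then
          ((ie.2.2.2.1, ie.1), PySem.List.pyGetD traversions ie.2.2.2.1 0, ie.2.2.2.2)
        else st
      else st)
    ((-1,-1), 9999999999, 19999999998)
  st.1

-- ===== PORT B =====
-- Source B's module-level precompute (run once at import) yields this constant table: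
-- node ↦ its valid (destination, position) pairs in ascending distance order
def pvSortedEdges (k : Int) : List (Int × Int) :=
  if k = 0 then [(1,1)]
  else if k = 1 then [(0,3),(2,2)]
  else if k = 2 then [(4,1),(3,3),(1,4)]
  else if k = 3 then [(2,1)]
  else if k = 4 then [(2,3),(5,4)]
  else [(4,2)]

def getLeastTraversedPartnerPosition_alt (nodeid : Int) (traversions : List Int) : Int × Int :=
  -- min(_SORTED_EDGES[nodeid], key=lambda p: traversions[p[0]], default=(-1,-1))
  PySem.List.minD (pvSortedEdges nodeid)
    (fun p => PySem.List.pyGetD traversions p.1 0) (-1, -1)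

-- ===== PRECONDITION & SPEC =====
-- Pre_ = exactly where the Python A returns: nodeid is a key of the fixed `nodes` table (else
-- KeyError) and traversions reaches every destination of that node's valid edges (else IndexError).
def Pre_getLeastTraversedPartnerPosition (nodeid : Int) (traversions : List Int) : Prop :=
  (nodeid = 0 ∧ 2 ≤ traversions.length) ∨ (nodeid = 1 ∧ 3 ≤ traversions.length) ∨
  (nodeid = 2 ∧ 5 ≤ traversions.length) ∨ (nodeid = 3 ∧ 3 ≤ traversions.length) ∨
  (nodeid = 4 ∧ 6 ≤ traversions.length) ∨ (nodeid = 5 ∧ 5 ≤ traversions.length)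
instance (nodeid : Int) (traversions : List Int) : Decidable (Pre_getLeastTraversedPartnerPosition nodeid traversions) := by unfold Pre_getLeastTraversedPartnerPosition; infer_instance
def pvWitness_getLeastTraversedPartnerPosition : Int × List Int := (0, [3, 1])

def Spec_getLeastTraversedPartnerPosition (nodeid : Int) (traversions : List Int) (out : Int × Int) : Prop := out = getLeastTraversedPartnerPosition_alt nodeid traversions
instance (nodeid : Int) (traversions : List Int) (out : Int × Int) : Decidable (Spec_getLeastTraversedPartnerPosition nodeid traversions out) := by unfold Spec_getLeastTraversedPartnerPosition; infer_instance

-- ===== CLAIM (what is proved, stated in full; the proofs are below) =====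
def Claim_equal_getLeastTraversedPartnerPosition : Prop := ∀ (nodeid : Int) (traversions : List Int), Dom_getLeastTraversedPartnerPosition nodeid traversions → Pre_getLeastTraversedPartnerPosition nodeid traversions → Spec_getLeastTraversedPartnerPosition nodeid traversions (getLeastTraversedPartnerPosition nodeid traversions)

-- ===== LEMMAS AND PROOFS =====

-- every stored traversal count is an element of traversions (or the default 0), hence < sentinel on Dom
theorem pvGetD_lt (traversions : List Int)
    (hB : ∀ x ∈ traversions, pvDomInt x = true) (idx : Int) :
    PySem.List.pyGetD traversions idx 0 < 9999999999 := by
  simp only [PySem.List.pyGetD]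
  rcases h : PySem.List.pyGet? traversions idx with _ | x
  · simp
  · have hx := PySem.List.mem_of_pyGet?_eq_some traversions h
    have := hB x hx
    simp only [pvDomInt, decide_eq_true_eq] at this
    simp only [Option.getD_some]
    omega

-- ===== VERDICT (by name: the statement is the Claim_ definition above) =====
theorem getLeastTraversedPartnerPosition_spec : Claim_equal_getLeastTraversedPartnerPosition := by
  intro nodeid traversions hDom hPre
  unfold Spec_getLeastTraversedPartnerPosition
  simp only [Dom_getLeastTraversedPartnerPosition, Bool.and_eq_true, List.all_eq_true] at hDom
  obtain ⟨-, hB⟩ := hDom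
  have hlt := pvGetD_lt traversions hB
  rcases hPre with ⟨h0, -⟩ | ⟨h1, -⟩ | ⟨h2, -⟩ | ⟨h3, -⟩ | ⟨h4, -⟩ | ⟨h5, -⟩ <;>
    subst_vars <;>
    (have hl0 := hlt 0; have hl1 := hlt 1; have hl2 := hlt 2;
     have hl3 := hlt 3; have hl4 := hlt 4; have hl5 := hlt 5) <;>
    simp only [getLeastTraversedPartnerPosition, getLeastTraversedPartnerPosition_alt,
      pvNodes, pvSortedEdges, PySem.List.minD, PySem.List.min?] <;>
    norm_num <;>
    split_ifs <;> simp_all <;> (try split_ifs) <;> (try simp_all) <;> omega
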